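-- pv_equiv track=rewrite | github.com/saurabh47/Data-structures-and-algorithms | foobar/Level-3/queue_to_do.py | solution
-- ===== SOURCE A (Python) =====
-- def xor_n(x):
--     if(x % 4 == 0):
--         return x
--     elif((x - 1) % 4 == 0):
--         return 1
--     elif((x - 2) % 4 == 0):
--         return x+1
--     else:
--         return 0
--
-- def solution(start, length):
--     result = 0
--     col = length-1
--     for i in range(length, 0, -1): # 4, 3
--         end  = start + col
--         result ^= (xor_n(start-1) ^ xor_n(end))
--         col -=1
--         start = start+length
--     return result
-- ===== SOURCE B (Python) =====
-- def ap_xor(b, s, m):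
--     # XOR of the arithmetic progression b, b+s, ..., b+s*(m-1).
--     # Strip the common power of two from the step (collecting the low bits of b),
--     # then split even/odd indices; m at least halves at each recursion.
--     if m <= 0:
--         return 0
--     if m == 1:
--         return b
--     if s == 0:
--         return b if m % 2 == 1 else 0
--     scale = 1
--     low = 0
--     while s % 2 == 0:
--         if m % 2 == 1:
--             low = low + (b % 2) * scale
--         b = b // 2
--         s = s // 2
--         scale = scale * 2
--     hi = ap_xor(b, 2 * s, (m + 1) // 2) ^ ap_xor(b + s, 2 * s, m // 2)
--     return hi * scale + low
--
--
-- def prog(a, d, L):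
--     # XOR_{i<L} f(a+i*d), where f(x) = (x, 1, x+1, 0)[x % 4] is the prefix-XOR
--     # formula.  Group i by i mod 4: within one class all arguments share the same
--     # residue mod 4, so f is affine there and the class reduces to one ap_xor call.
--     res = 0
--     for c in range(4):
--         m = (L + 3 - c) // 4
--         x = a + c * d
--         r = x % 4
--         if r == 0:
--             res ^= ap_xor(x, 4 * d, m)
--         elif r == 1:
--             res ^= m & 1
--         elif r == 2:
--             res ^= ap_xor(x + 1, 4 * d, m)
--     return res
--
--
-- def solution(start, length):
--     # Row i XORs f(start+i*length-1) ^ f(start+length-1+i*(length-1)); the two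
--     # argument families are arithmetic progressions, handled by prog.
--     if length <= 0:
--         return 0
--     return prog(start - 1, length, length) ^ prog(start + length - 1, length - 1, length)
-- ===== Notes on version B (the rewrite author's own statement) =====
-- stated objective: alternative
-- what changed: A walks the triangle row by row, mutating start/col state and applying the prefix-XOR formula once per row; B has no row loop: it groups the formula's arguments by index residue mod 4 (where the formula is affine), reducing the checksum to XORs of arithmetic progressions, each computed by a recursive ap_xor that strips common low bits (even step) and splits even/odd indices (odd step).
import Mathlib
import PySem

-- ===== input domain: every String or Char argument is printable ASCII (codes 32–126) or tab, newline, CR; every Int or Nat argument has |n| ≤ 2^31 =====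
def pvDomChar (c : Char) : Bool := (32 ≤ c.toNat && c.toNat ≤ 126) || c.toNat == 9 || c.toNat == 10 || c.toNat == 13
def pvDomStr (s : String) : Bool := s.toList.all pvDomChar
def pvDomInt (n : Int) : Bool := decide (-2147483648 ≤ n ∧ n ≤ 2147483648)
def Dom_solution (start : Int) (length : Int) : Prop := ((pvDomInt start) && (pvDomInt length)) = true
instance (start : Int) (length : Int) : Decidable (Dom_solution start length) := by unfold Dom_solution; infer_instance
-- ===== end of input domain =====

-- B replaces A's row-by-row walk by grouping the formula arguments into residue-mod-4 classes and XOR-ing each resulting arithmetic progression with a recursive bit/index-parity ap_xor (alternative decomposition, similar cost).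


-- ===== PORT A =====
def xorN (x : Int) : Int :=
  if PySem.Int.mod x 4 = 0 then x
  else if PySem.Int.mod (x - 1) 4 = 0 then 1
  else if PySem.Int.mod (x - 2) 4 = 0 then x + 1
  else 0

def solution (start : Int) (length : Int) : Int :=
  ((PySem.List.pyRange length 0 (-1)).foldl
    (fun st _ =>
      let e := st.2.2 + st.2.1
      (PySem.Int.bxor st.1 (PySem.Int.bxor (xorN (st.2.2 - 1)) (xorN e)),
       st.2.1 - 1, st.2.2 + length))
    (0, length - 1, start)).1

-- ===== PORT B =====
-- XOR of b, b+s, ..., b+s*(m-1); '//' '%' are floor div/mod (exact on all ints).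
-- The while loop that strips the even part of the step, with its state (b, s, scale, low);
-- fuel s.natAbs bounds its trip count (the loop runs at most trailing-zeros-of-s times).
def apStrip (b : Int) (s : Int) (m : Int) (scale : Int) (low : Int) : Nat → Int × Int × Int × Int
  | 0 => (b, s, scale, low)
  | fuel + 1 =>
    if PySem.Int.mod s 2 = 0 then
      apStrip (PySem.Int.floordiv b 2) (PySem.Int.floordiv s 2) m (scale * 2)
        (if PySem.Int.mod m 2 = 1 then low + (PySem.Int.mod b 2) * scale else low) fuel
    else (b, s, scale, low)

-- the recursion at least halves m each call; fuel m.toNat + 1 (passed by the caller) bounds its depth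
def apXor (b : Int) (s : Int) (m : Int) : Nat → Int
  | 0 => 0
  | fuel + 1 =>
    if m ≤ 0 then 0
    else if m = 1 then b
    else if s = 0 then (if PySem.Int.mod m 2 = 1 then b else 0)
    else
      let r := apStrip b s m 1 0 s.natAbs
      PySem.Int.bxor (apXor r.1 (2 * r.2.1) (PySem.Int.floordiv (m + 1) 2) fuel)
          (apXor (r.1 + r.2.1) (2 * r.2.1) (PySem.Int.floordiv m 2) fuel) * r.2.2.1 + r.2.2.2

-- XOR_{i<L} of the prefix-XOR formula at a+i*d, via the four classes of i mod 4
def prog (a : Int) (d : Int) (L : Int) : Int :=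
  (PySem.List.pyRange 0 4 1).foldl
    (fun res c =>
      let m := PySem.Int.floordiv (L + 3 - c) 4
      let x := a + c * d
      let r := PySem.Int.mod x 4
      if r = 0 then PySem.Int.bxor res (apXor x (4 * d) m (m.toNat + 1))
      else if r = 1 then PySem.Int.bxor res (PySem.Int.mod m 2)
      else if r = 2 then PySem.Int.bxor res (apXor (x + 1) (4 * d) m (m.toNat + 1))
      else res) 0

def solution_alt (start : Int) (length : Int) : Int :=
  if length ≤ 0 then 0
  else PySem.Int.bxor (prog (start - 1) length length)
    (prog (start + length - 1) (length - 1) length)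

-- ===== PRECONDITION & SPEC =====
def Spec_solution (start : Int) (length : Int) (out : Int) : Prop := out = solution_alt start length
instance (start : Int) (length : Int) (out : Int) : Decidable (Spec_solution start length out) := by unfold Spec_solution; infer_instance

-- ===== CLAIM (what is proved, stated in full; the proofs are below) =====
def Claim_equal_solution : Prop := ∀ (start : Int) (length : Int), Dom_solution start length → Spec_solution start length (solution start length)

-- ===== LEMMAS AND PROOFS =====

-- sign-magnitude encoding of Python's infinite two's complement
def pvDec (s : Bool) (n : Nat) : Int := if s then -(n : Int) - 1 else (n : Int)

lemma pvDec_repr (a : Int) : ∃ s n, a = pvDec s n := by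
  by_cases h : 0 ≤ a
  · exact ⟨false, a.toNat, by simp [pvDec]; omega⟩
  · exact ⟨true, (-a - 1).toNat, by simp [pvDec]; omega⟩

lemma pvBxor_dec (s t : Bool) (m n : Nat) :
    PySem.Int.bxor (pvDec s m) (pvDec t n) = pvDec (xor s t) (m ^^^ n) := by
  have e1 : ∀ k : Nat, ((k : Int)).toNat = k := fun k => Int.toNat_natCast k
  have e2 : ∀ k : Nat, (-(-(k : Int) - 1) - 1).toNat = k := fun k => by omega
  cases s <;> cases t
  · show PySem.Int.bxor (m : Int) (n : Int) = ((m ^^^ n : Nat) : Int)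
    unfold PySem.Int.bxor
    rw [if_pos (by omega), if_pos (by omega), e1, e1]
  · show PySem.Int.bxor (m : Int) (-(n : Int) - 1) = -((m ^^^ n : Nat) : Int) - 1
    unfold PySem.Int.bxor
    rw [if_pos (by omega), if_neg (by omega), e1, e2]
  · show PySem.Int.bxor (-(m : Int) - 1) (n : Int) = -((m ^^^ n : Nat) : Int) - 1
    unfold PySem.Int.bxor
    rw [if_neg (by omega), if_pos (by omega), e1, e2]
  · show PySem.Int.bxor (-(m : Int) - 1) (-(n : Int) - 1) = ((m ^^^ n : Nat) : Int)
    unfold PySem.Int.bxor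
    rw [if_neg (by omega), if_neg (by omega), e2, e2]

lemma pvBxor_assoc (a b c : Int) :
    PySem.Int.bxor (PySem.Int.bxor a b) c = PySem.Int.bxor a (PySem.Int.bxor b c) := by
  obtain ⟨sa, na, rfl⟩ := pvDec_repr a
  obtain ⟨sb, nb, rfl⟩ := pvDec_repr b
  obtain ⟨sc, nc, rfl⟩ := pvDec_repr c
  rw [pvBxor_dec, pvBxor_dec, pvBxor_dec, pvBxor_dec, Bool.xor_assoc, Nat.xor_assoc]

lemma pvZero_bxor (a : Int) : PySem.Int.bxor 0 a = a := by
  rw [PySem.Int.bxor_comm, PySem.Int.bxor_zero]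

lemma pvBxor_self (a : Int) : PySem.Int.bxor a a = 0 := by
  obtain ⟨s, n, rfl⟩ := pvDec_repr a
  rw [pvBxor_dec, Bool.xor_self, Nat.xor_self]
  rfl

lemma pvXor4 (a b c d : Int) :
    PySem.Int.bxor (PySem.Int.bxor a b) (PySem.Int.bxor c d)
      = PySem.Int.bxor (PySem.Int.bxor a c) (PySem.Int.bxor b d) := by
  rw [pvBxor_assoc, ← pvBxor_assoc b c d, PySem.Int.bxor_comm b c, pvBxor_assoc c b d,
    ← pvBxor_assoc]

-- two's-complement pair lemma: xor respects the low bit / halves decomposition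
lemma pvBit_xor_bit (a b : Bool) (m n : Nat) :
    Nat.bit a m ^^^ Nat.bit b n = Nat.bit (a ^^ b) (m ^^^ n) := by
  apply Nat.eq_of_testBit_eq
  intro k
  cases k with
  | zero => simp
  | succ k => simp [Nat.testBit_xor, Nat.testBit_bit_succ]

lemma pvPair (u v c e : Int) (hc : c = 0 ∨ c = 1) (he : e = 0 ∨ e = 1) :
    PySem.Int.bxor (2 * u + c) (2 * v + e)
      = 2 * PySem.Int.bxor u v + (if c = e then 0 else 1) := by
  obtain ⟨su, nu, rfl⟩ := pvDec_repr u
  obtain ⟨sv, nv, rfl⟩ := pvDec_repr v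
  have key : ∀ (s : Bool) (n : Nat) (c : Int), c = 0 ∨ c = 1 →
      ∃ b : Nat, 2 * pvDec s n + c = pvDec s (2 * n + b) ∧ (b = if s then 1 - c.toNat else c.toNat) := by
    intro s n c hc
    refine ⟨_, ?_, rfl⟩
    rcases hc with rfl | rfl <;> cases s <;> simp [pvDec] <;> omega
  obtain ⟨bu, hu, hbu⟩ := key su nu c hc
  obtain ⟨bv, hv, hbv⟩ := key sv nv e he
  obtain ⟨br, hr, hbr⟩ := key (xor su sv) (nu ^^^ nv) (if c = e then 0 else 1)
      (by split_ifs <;> simp)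
  have hbu' : bu ≤ 1 := by rcases hc with rfl | rfl <;> cases su <;> simp [hbu]
  have hbv' : bv ≤ 1 := by rcases he with rfl | rfl <;> cases sv <;> simp [hbv]
  have hxb : bu ^^^ bv ≤ 1 := by interval_cases bu <;> interval_cases bv <;> decide
  have e2 : ∀ (n b : Nat), b ≤ 1 → 2 * n + b = Nat.bit (decide (b = 1)) n := by
    intro n b hb
    interval_cases b <;> simp [Nat.bit]
  have hx : (2 * nu + bu) ^^^ (2 * nv + bv) = 2 * (nu ^^^ nv) + (bu ^^^ bv) := by
    rw [e2 nu bu hbu', e2 nv bv hbv', e2 (nu ^^^ nv) (bu ^^^ bv) hxb, pvBit_xor_bit]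
    congr 1
    interval_cases bu <;> interval_cases bv <;> decide
  have hbit : bu ^^^ bv = br := by
    rw [hbu, hbv, hbr]
    rcases hc with rfl | rfl <;> rcases he with rfl | rfl <;> cases su <;> cases sv <;> decide
  rw [hu, hv, pvBxor_dec, hx, hbit, pvBxor_dec, hr]

def pvBigxor (f : Nat → Int) : Nat → Int
  | 0 => 0
  | n + 1 => PySem.Int.bxor (pvBigxor f n) (f n)

lemma pvBigxor_congr (f g : Nat → Int) (n : Nat) (h : ∀ i, i < n → f i = g i) :
    pvBigxor f n = pvBigxor g n := by
  induction n with
  | zero => rfl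
  | succ n ih =>
    simp only [pvBigxor]
    rw [ih (fun i hi => h i (by omega)), h n (by omega)]

lemma pvBigxor_split (f g : Nat → Int) (n : Nat) :
    pvBigxor (fun i => PySem.Int.bxor (f i) (g i)) n
      = PySem.Int.bxor (pvBigxor f n) (pvBigxor g n) := by
  induction n with
  | zero => simp [pvBigxor]
  | succ n ih => simp only [pvBigxor]; rw [ih, pvXor4]

lemma pvBigxor_const (b : Int) (n : Nat) :
    pvBigxor (fun _ => b) n = if n % 2 = 1 then b else 0 := by
  induction n with
  | zero => rfl
  | succ n ih =>
    simp only [pvBigxor, ih]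
    by_cases h : n % 2 = 1
    · have h2 : ¬((n + 1) % 2 = 1) := by omega
      rw [if_pos h, if_neg h2, pvBxor_self]
    · have h2 : (n + 1) % 2 = 1 := by omega
      rw [if_neg h, if_pos h2, pvZero_bxor]

lemma pvBigxor_double (y : Nat → Int) (c : Int) (hc : c = 0 ∨ c = 1) (n : Nat) :
    pvBigxor (fun j => 2 * y j + c) n
      = 2 * pvBigxor y n + (if n % 2 = 1 then c else 0) := by
  induction n with
  | zero => simp [pvBigxor]
  | succ n ih =>
    simp only [pvBigxor, ih]
    rw [pvPair _ _ _ _ (by split_ifs <;> simp [hc]) hc]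
    congr 1
    by_cases h : n % 2 = 1
    · have h2 : ¬((n + 1) % 2 = 1) := by omega
      rw [if_pos h, if_neg h2, if_pos rfl]
    · have h2 : (n + 1) % 2 = 1 := by omega
      rw [if_neg h, if_pos h2]
      rcases hc with rfl | rfl <;> simp

lemma pvBigxor_interleave (f : Nat → Int) (n : Nat) :
    pvBigxor f n
      = PySem.Int.bxor (pvBigxor (fun k => f (2 * k)) ((n + 1) / 2))
          (pvBigxor (fun k => f (2 * k + 1)) (n / 2)) := by
  induction n with
  | zero => simp [pvBigxor]
  | succ n ih =>
    simp only [pvBigxor, ih]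
    by_cases h : n % 2 = 0
    · have e1 : (n + 1 + 1) / 2 = (n + 1) / 2 + 1 := by omega
      have e2 : (n + 1) / 2 = n / 2 := by omega
      rw [e1, e2]
      simp only [pvBigxor]
      have e3 : 2 * (n / 2) = n := by omega
      rw [e3, pvBxor_assoc, PySem.Int.bxor_comm (pvBigxor (fun k => f (2 * k + 1)) (n / 2)) (f n),
        ← pvBxor_assoc]
    · have e1 : (n + 1 + 1) / 2 = (n + 1) / 2 := by omega
      have e2 : (n + 1) / 2 = n / 2 + 1 := by omega
      rw [e1, e2]
      simp only [pvBigxor]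
      have e3 : 2 * (n / 2) + 1 = n := by omega
      rw [e3, pvBxor_assoc]

lemma pvMod_eq (y : Int) : PySem.Int.mod y 4 = y % 4 := by
  show Int.fmod y 4 = y % 4
  rw [Int.fmod_eq_emod, if_pos (Or.inl (by norm_num)), add_zero]

lemma pvMod2_eq (y : Int) : PySem.Int.mod y 2 = y % 2 := by
  show Int.fmod y 2 = y % 2
  rw [Int.fmod_eq_emod, if_pos (Or.inl (by norm_num)), add_zero]

lemma pvFdiv_eq (y : Int) (k : Int) (hk : 0 < k) : PySem.Int.floordiv y k = y / k := by
  show Int.fdiv y k = y / k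
  rw [Int.fdiv_eq_ediv, if_pos (Or.inl (by omega)), sub_zero]

lemma pvXorN_eq_xorUpto (x : Int) :
    xorN x = (if x % 4 = 0 then x else if x % 4 = 1 then 1 else if x % 4 = 2 then x + 1 else 0) := by
  unfold xorN
  rw [pvMod_eq, pvMod_eq, pvMod_eq]
  split_ifs <;> omega

lemma pvStrip_eq (m : Int) (hm : 0 < m) : ∀ (fuel : Nat) (b s scale low : Int),
    s ≠ 0 → s.natAbs ≤ fuel →
    ¬ PySem.Int.mod (apStrip b s m scale low fuel).2.1 2 = 0 ∧
    (apStrip b s m scale low fuel).2.1 ≠ 0 ∧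
    (apStrip b s m scale low fuel).2.2.1
        * pvBigxor (fun j => (apStrip b s m scale low fuel).1
            + (j : Int) * (apStrip b s m scale low fuel).2.1) m.toNat
        + (apStrip b s m scale low fuel).2.2.2
      = scale * pvBigxor (fun j => b + (j : Int) * s) m.toNat + low := by
  intro fuel
  induction fuel with
  | zero => intro b s scale low hs hf; omega
  | succ fuel ih =>
    intro b s scale low hs hf
    by_cases he : PySem.Int.mod s 2 = 0
    · have hstep : apStrip b s m scale low (fuel + 1)
          = apStrip (PySem.Int.floordiv b 2) (PySem.Int.floordiv s 2) m (scale * 2)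
              (if PySem.Int.mod m 2 = 1 then low + (PySem.Int.mod b 2) * scale else low) fuel := by
        simp only [apStrip, if_pos he]
      have hse : Int.fmod s 2 = s % 2 := pvMod2_eq s
      have hsd : PySem.Int.floordiv s 2 = s / 2 := pvFdiv_eq s 2 (by norm_num)
      have hsm : Int.fmod s 2 = 0 := he
      have hs2 : PySem.Int.floordiv s 2 ≠ 0 := by rw [hsd]; omega
      have hf2 : (PySem.Int.floordiv s 2).natAbs ≤ fuel := by rw [hsd]; omega
      obtain ⟨c1, c2, c3⟩ := ih (PySem.Int.floordiv b 2) (PySem.Int.floordiv s 2) (scale * 2)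
        (if PySem.Int.mod m 2 = 1 then low + (PySem.Int.mod b 2) * scale else low) hs2 hf2
      rw [hstep]
      refine ⟨c1, c2, ?_⟩
      rw [c3]
      have hb := Int.mul_fdiv_add_fmod b 2
      have hbe : Int.fmod b 2 = b % 2 := pvMod2_eq b
      have hb0 := Int.emod_nonneg b (by norm_num : (2:Int) ≠ 0)
      have hb1 := Int.emod_lt_of_pos b (by norm_num : (0:Int) < 2)
      have hsf := Int.mul_fdiv_add_fmod s 2
      have hcb : Int.fmod b 2 = 0 ∨ Int.fmod b 2 = 1 := by omega
      have e : (fun j : Nat => b + (j : Int) * s)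
          = fun j : Nat => 2 * (PySem.Int.floordiv b 2 + (j : Int) * PySem.Int.floordiv s 2)
              + Int.fmod b 2 := by
        funext j
        show b + (j : Int) * s = 2 * (Int.fdiv b 2 + (j : Int) * Int.fdiv s 2) + Int.fmod b 2
        linear_combination (-1 : Int) * hb - (j : Int) * hsf + (j : Int) * hsm
      rw [e, pvBigxor_double _ _ hcb]
      have hm2 : PySem.Int.mod m 2 = m % 2 := pvMod2_eq m
      by_cases hp : m.toNat % 2 = 1
      · rw [if_pos hp, if_pos (show PySem.Int.mod m 2 = 1 by rw [hm2]; omega)]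
        show scale * 2 * _ + (low + Int.fmod b 2 * scale) = scale * (2 * _ + Int.fmod b 2) + low
        ring
      · rw [if_neg hp, if_neg (show ¬ PySem.Int.mod m 2 = 1 by rw [hm2]; omega)]
        ring
    · have hstep : apStrip b s m scale low (fuel + 1) = (b, s, scale, low) := by
        simp only [apStrip, if_neg he]
      rw [hstep]
      exact ⟨he, hs, by ring⟩

lemma pvApXor_eq : ∀ (fuel : Nat) (b s m : Int), m.toNat < fuel →
    apXor b s m fuel = pvBigxor (fun j => b + (j : Int) * s) m.toNat := by
  intro fuel
  induction fuel with
  | zero => intro b s m hf; omega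
  | succ fuel ih =>
    intro b s m hf
    show (if m ≤ 0 then 0
      else if m = 1 then b
      else if s = 0 then (if PySem.Int.mod m 2 = 1 then b else 0)
      else
        let r := apStrip b s m 1 0 s.natAbs
        PySem.Int.bxor (apXor r.1 (2 * r.2.1) (PySem.Int.floordiv (m + 1) 2) fuel)
            (apXor (r.1 + r.2.1) (2 * r.2.1) (PySem.Int.floordiv m 2) fuel) * r.2.2.1 + r.2.2.2) = _
    by_cases h : m ≤ 0
    · rw [if_pos h]
      have e0 : m.toNat = 0 := by omega
      rw [e0]; rfl
    · rw [if_neg h]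
      by_cases h1 : m = 1
      · rw [if_pos h1, h1]
        show b = pvBigxor _ (1 : Int).toNat
        simp only [Int.toNat_one, pvBigxor]
        rw [pvZero_bxor]
        simp
      · rw [if_neg h1]
        by_cases h2 : s = 0
        · rw [if_pos h2, h2]
          have e : (fun j : Nat => b + (j : Int) * 0) = fun _ => b := by funext j; ring
          rw [e, pvBigxor_const]
          have hm2 : PySem.Int.mod m 2 = m % 2 := pvMod2_eq m
          by_cases hp : m.toNat % 2 = 1
          · rw [if_pos hp, if_pos (show PySem.Int.mod m 2 = 1 by rw [hm2]; omega)]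
          · rw [if_neg hp, if_neg (show ¬ PySem.Int.mod m 2 = 1 by rw [hm2]; omega)]
        · rw [if_neg h2]
          simp only []
          obtain ⟨hodd, hs0, heq⟩ := pvStrip_eq m (by omega) s.natAbs b s 1 0 h2 (le_refl _)
          have hm2 : 2 ≤ m := by omega
          have e1 : (PySem.Int.floordiv (m + 1) 2).toNat = (m.toNat + 1) / 2 := by
            rw [pvFdiv_eq _ _ (by norm_num)]
            omega
          have e2 : (PySem.Int.floordiv m 2).toNat = m.toNat / 2 := by
            rw [pvFdiv_eq _ _ (by norm_num)]
            omega
          have hfa : (PySem.Int.floordiv (m + 1) 2).toNat < fuel := by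
            rw [e1]; omega
          have hfb : (PySem.Int.floordiv m 2).toNat < fuel := by
            rw [e2]; omega
          rw [ih _ _ _ hfa, ih _ _ _ hfb, e1, e2]
          have hint := pvBigxor_interleave
            (fun j => (apStrip b s m 1 0 s.natAbs).1 + (j : Int) * (apStrip b s m 1 0 s.natAbs).2.1)
            m.toNat
          have hE : pvBigxor (fun k => (apStrip b s m 1 0 s.natAbs).1
                + ((2 * k : Nat) : Int) * (apStrip b s m 1 0 s.natAbs).2.1) ((m.toNat + 1) / 2)
              = pvBigxor (fun j => (apStrip b s m 1 0 s.natAbs).1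
                + (j : Int) * (2 * (apStrip b s m 1 0 s.natAbs).2.1)) ((m.toNat + 1) / 2) := by
            apply pvBigxor_congr; intro k _; push_cast; ring
          have hO : pvBigxor (fun k => (apStrip b s m 1 0 s.natAbs).1
                + ((2 * k + 1 : Nat) : Int) * (apStrip b s m 1 0 s.natAbs).2.1) (m.toNat / 2)
              = pvBigxor (fun j => (apStrip b s m 1 0 s.natAbs).1 + (apStrip b s m 1 0 s.natAbs).2.1
                + (j : Int) * (2 * (apStrip b s m 1 0 s.natAbs).2.1)) (m.toNat / 2) := by
            apply pvBigxor_congr; intro k _; push_cast; ring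
          rw [hE, hO] at hint
          rw [← hint]
          linear_combination heq

-- the contribution of one residue class, as B computes it inside the fold
def pvC (a d L c : Int) : Int :=
  let m := PySem.Int.floordiv (L + 3 - c) 4
  let x := a + c * d
  let r := PySem.Int.mod x 4
  if r = 0 then apXor x (4 * d) m (m.toNat + 1)
  else if r = 1 then PySem.Int.mod m 2
  else if r = 2 then apXor (x + 1) (4 * d) m (m.toNat + 1)
  else 0

lemma pvC_eq (a d L c : Int) (hm : 0 ≤ L + 3 - c) :
    pvC a d L c
      = pvBigxor
          (fun j => xorN (a + c * d + (j : Int) * (4 * d)))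
          ((PySem.Int.floordiv (L + 3 - c) 4).toNat) := by
  unfold pvC
  simp only []
  set m := PySem.Int.floordiv (L + 3 - c) 4 with hmdef
  set x := a + c * d with hxdef
  have hm0 : 0 ≤ m := by rw [hmdef, pvFdiv_eq _ _ (by norm_num)]; omega
  have hr4 := Int.emod_emod_of_dvd x (by norm_num : (4:Int) ∣ 4)
  have hrb : 0 ≤ x % 4 ∧ x % 4 < 4 := ⟨Int.emod_nonneg x (by norm_num), Int.emod_lt_of_pos x (by norm_num)⟩
  have hargmod : ∀ j : Nat, (x + (j : Int) * (4 * d)) % 4 = x % 4 := by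
    intro j
    have : (j : Int) * (4 * d) = 4 * ((j : Int) * d) := by ring
    rw [this]
    omega
  rw [pvMod_eq]
  by_cases h0 : x % 4 = 0
  · rw [if_pos h0, pvApXor_eq _ _ _ _ (by omega)]
    apply pvBigxor_congr
    intro j _
    rw [pvXorN_eq_xorUpto, hargmod j, if_pos h0]
  · rw [if_neg h0]
    by_cases h1 : x % 4 = 1
    · rw [if_pos h1]
      have e : (fun j : Nat => xorN (x + (j : Int) * (4 * d))) = fun _ => (1 : Int) := by
        funext j
        rw [pvXorN_eq_xorUpto, hargmod j, if_neg h0, if_pos h1]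
      rw [e, pvBigxor_const, pvMod2_eq]
      by_cases hp : m.toNat % 2 = 1
      · rw [if_pos hp]; omega
      · rw [if_neg hp]; omega
    · rw [if_neg h1]
      by_cases h2 : x % 4 = 2
      · rw [if_pos h2, pvApXor_eq _ _ _ _ (by omega)]
        apply pvBigxor_congr
        intro j _
        rw [pvXorN_eq_xorUpto, hargmod j, if_neg h0, if_neg h1, if_pos h2]
        ring
      · rw [if_neg h2]
        have e : (fun j : Nat => xorN (x + (j : Int) * (4 * d))) = fun _ => (0 : Int) := by
          funext j
          rw [pvXorN_eq_xorUpto, hargmod j, if_neg h0, if_neg h1, if_neg h2]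
        rw [e, pvBigxor_const]
        split_ifs <;> rfl

lemma pvProg_eq (a d L : Int) (hL : 0 < L) :
    prog a d L = pvBigxor (fun i => xorN (a + (i : Int) * d)) L.toNat := by
  have hrange : PySem.List.pyRange 0 4 1 = [0, 1, 2, 3] := by decide
  have hstep : ∀ (res c : Int),
      (fun res c =>
        let m := PySem.Int.floordiv (L + 3 - c) 4
        let x := a + c * d
        let r := PySem.Int.mod x 4
        if r = 0 then PySem.Int.bxor res (apXor x (4 * d) m (m.toNat + 1))
        else if r = 1 then PySem.Int.bxor res (PySem.Int.mod m 2)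
        else if r = 2 then PySem.Int.bxor res (apXor (x + 1) (4 * d) m (m.toNat + 1))
        else res) res c = PySem.Int.bxor res (pvC a d L c) := by
    intro res c
    simp only [pvC]
    split_ifs <;> simp [PySem.Int.bxor_zero]
  show (PySem.List.pyRange 0 4 1).foldl _ 0 = _
  rw [hrange]
  simp only [List.foldl_cons, List.foldl_nil, hstep]
  rw [pvZero_bxor]
  -- counts of the four classes
  set n := L.toNat with hn
  have hLn : L = (n : Int) := by omega
  have hc : ∀ c : Int, 0 ≤ c → c ≤ 3 →
      (PySem.Int.floordiv (L + 3 - c) 4).toNat = (n + 3 - c.toNat) / 4 := by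
    intro c h0 h3
    rw [pvFdiv_eq _ _ (by norm_num)]
    omega
  -- split the big xor twice
  rw [pvBigxor_interleave (fun i => xorN (a + (i : Int) * d)) n,
    pvBigxor_interleave (fun k => xorN (a + ((2 * k : Nat) : Int) * d)) ((n + 1) / 2),
    pvBigxor_interleave (fun k => xorN (a + ((2 * k + 1 : Nat) : Int) * d)) (n / 2)]
  have C0 : pvC a d L 0 = pvBigxor (fun k => xorN (a + ((2 * (2 * k) : Nat) : Int) * d)) (((n + 1) / 2 + 1) / 2) := by
    rw [pvC_eq a d L 0 (by omega), hc 0 (by norm_num) (by norm_num)]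
    have e0 : (n + 3 - (0:Int).toNat) / 4 = ((n + 1) / 2 + 1) / 2 := by omega
    rw [e0]
    apply pvBigxor_congr; intro k _; congr 1; push_cast; ring
  have C2 : pvC a d L 2 = pvBigxor (fun k => xorN (a + ((2 * (2 * k + 1) : Nat) : Int) * d)) (((n + 1) / 2) / 2) := by
    rw [pvC_eq a d L 2 (by omega), hc 2 (by norm_num) (by norm_num)]
    have e0 : (n + 3 - (2:Int).toNat) / 4 = ((n + 1) / 2) / 2 := by omega
    rw [e0]
    apply pvBigxor_congr; intro k _; congr 1; push_cast; ring
  have C1 : pvC a d L 1 = pvBigxor (fun k => xorN (a + ((2 * (2 * k) + 1 : Nat) : Int) * d)) ((n / 2 + 1) / 2) := by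
    rw [pvC_eq a d L 1 (by omega), hc 1 (by norm_num) (by norm_num)]
    have e0 : (n + 3 - (1:Int).toNat) / 4 = (n / 2 + 1) / 2 := by omega
    rw [e0]
    apply pvBigxor_congr; intro k _; congr 1; push_cast; ring
  have C3 : pvC a d L 3 = pvBigxor (fun k => xorN (a + ((2 * (2 * k + 1) + 1 : Nat) : Int) * d)) ((n / 2) / 2) := by
    rw [pvC_eq a d L 3 (by omega), hc 3 (by norm_num) (by norm_num)]
    have e0 : (n + 3 - (3:Int).toNat) / 4 = (n / 2) / 2 := by omega
    rw [e0]
    apply pvBigxor_congr; intro k _; congr 1; push_cast; ring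
  rw [← C0, ← C1, ← C2, ← C3]
  rw [pvXor4, ← pvBxor_assoc]

-- ===== A-SIDE CHARACTERISATION (as a fold of per-row terms) =====
def pvStep (length : Int) (st : Int × Int × Int) : Int × Int × Int :=
  (PySem.Int.bxor st.1 (PySem.Int.bxor (xorN (st.2.2 - 1)) (xorN (st.2.2 + st.2.1))),
   st.2.1 - 1, st.2.2 + length)

def pvTerm (start length : Int) (i : Nat) : Int :=
  PySem.Int.bxor (xorN (start + (i : Int) * length - 1))
    (xorN (start + length - 1 + (i : Int) * (length - 1)))

lemma pvFoldl_const {α β : Type} (l : List α) (g : β → β) (init : β) :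
    l.foldl (fun st _ => g st) init = g^[l.length] init := by
  induction l generalizing init with
  | nil => rfl
  | cons x xs ih => simp [List.foldl_cons, ih, Function.iterate_succ_apply]

lemma pvRange_down_length (L : Int) : (PySem.List.pyRange L 0 (-1)).length = L.toNat := by
  simp [PySem.List.pyRange]
  omega

lemma pvIterA (start length : Int) (n : Nat) : ∀ (j : Nat) (r : Int),
    (pvStep length)^[n] (r, length - 1 - (j : Int), start + (j : Int) * length)
      = (PySem.Int.bxor r (pvBigxor (fun i => pvTerm start length (j + i)) n),
         length - 1 - ((j + n : Nat) : Int), start + ((j + n : Nat) : Int) * length) := by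
  induction n with
  | zero => intro j r; simp [pvBigxor, PySem.Int.bxor_zero]
  | succ n ih =>
    intro j r
    rw [Function.iterate_succ_apply', ih j r]
    have harg : start + ((j + n : Nat) : Int) * length + (length - 1 - ((j + n : Nat) : Int))
        = start + length - 1 + ((j + n : Nat) : Int) * (length - 1) := by push_cast; ring
    show (PySem.Int.bxor (PySem.Int.bxor r (pvBigxor (fun i => pvTerm start length (j + i)) n))
            (PySem.Int.bxor (xorN (start + ((j + n : Nat) : Int) * length - 1))
              (xorN (start + ((j + n : Nat) : Int) * length + (length - 1 - ((j + n : Nat) : Int))))),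
          length - 1 - ((j + n : Nat) : Int) - 1,
          start + ((j + n : Nat) : Int) * length + length)
        = (PySem.Int.bxor r (pvBigxor (fun i => pvTerm start length (j + i)) (n + 1)),
           length - 1 - ((j + (n + 1) : Nat) : Int),
           start + ((j + (n + 1) : Nat) : Int) * length)
    simp only [Prod.mk.injEq]
    refine ⟨?_, ?_, ?_⟩
    · rw [harg]
      show PySem.Int.bxor (PySem.Int.bxor r (pvBigxor (fun i => pvTerm start length (j + i)) n))
            (pvTerm start length (j + n))
          = PySem.Int.bxor r (pvBigxor (fun i => pvTerm start length (j + i)) (n + 1))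
      rw [pvBxor_assoc]
      rfl
    · push_cast; ring
    · push_cast; ring

lemma pvSolution_eq (start length : Int) :
    solution start length
      = pvBigxor (fun i => pvTerm start length i) length.toNat := by
  show ((PySem.List.pyRange length 0 (-1)).foldl (fun st _ => pvStep length st)
      (0, length - 1, start)).1 = _
  rw [pvFoldl_const, pvRange_down_length]
  have h := pvIterA start length length.toNat 0 0
  simp only [Nat.cast_zero, zero_mul, add_zero, sub_zero, Nat.zero_add] at h
  rw [h, pvZero_bxor]

-- ===== VERDICT (by name: the statement is the Claim_ definition above) =====
theorem solution_spec : Claim_equal_solution := by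
  intro start length _
  show solution start length = solution_alt start length
  unfold solution_alt
  by_cases hL : length ≤ 0
  · rw [if_pos hL, pvSolution_eq]
    have : length.toNat = 0 := by omega
    rw [this]; rfl
  · rw [if_neg hL, pvSolution_eq]
    have hL' : 0 < length := by omega
    have hsplit : (fun i : Nat => pvTerm start length i)
        = fun i : Nat => PySem.Int.bxor (xorN (start - 1 + (i : Int) * length))
            (xorN (start + length - 1 + (i : Int) * (length - 1))) := by
      funext i
      unfold pvTerm
      congr 2
      ring
    rw [hsplit, pvBigxor_split, pvProg_eq _ _ _ hL', pvProg_eq _ _ _ hL']
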